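-- pv_equiv track=rewrite | github.com/sereres/AOC_Dec19_2020 | main.py | find_substrings
-- ===== SOURCE A (Python) =====
-- def find_substrings(string):
--     if string.count(" ") == 0:
--         return [string]
--     substrings = []
--     depth = 0
--     temp_substring = ""
--     for char in string + " ":
--         if char == '(':
--             depth += 1
--             if depth > 1:
--                 temp_substring += char
--             continue
--         if char == ')':
--             depth -= 1
--             if depth > 0:
--                 temp_substring += char
--             continue
--         if depth > 0:
--             temp_substring += char
--         if depth == 0 and len(temp_substring) > 0:
--             substrings.append(temp_substring)
--             temp_substring = ""
--         if depth == 0 and char != " ":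
--             substrings.append(char)
--     return substrings
-- ===== SOURCE B (Python) =====
-- def find_substrings(string):
--     if string.count(" ") == 0:
--         return [string]
--     s = string + " "
--     # pass 1: annotate every char with the parenthesis balance before and after it
--     triples = []
--     b = 0
--     for c in s:
--         pre = b
--         b += (c == '(') - (c == ')')
--         triples.append((c, pre, b))
--     # pass 2: cut at top-level non-paren chars ("boundaries"); a char belongs to a
--     # token's interior exactly when the balance on both of its sides is positive
--     out = []
--     seg = []
--     for c, pre, post in triples:
--         if pre == 0 and c not in '()':
--             inner = "".join(t[0] for t in seg if min(t[1], t[2]) > 0)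
--             if inner:
--                 out.append(inner)
--             if c != ' ':
--                 out.append(c)
--             seg = []
--         else:
--             seg.append((c, pre, post))
--     return out
-- ===== Notes on version B (the rewrite author's own statement) =====
-- stated objective: alternative
-- what changed: A's single stateful pass (a mutable depth counter with per-branch append/flush/emit rules interleaved) is replaced by staged passes: first annotate every character with the parenthesis balance before and after it, then cut the annotated string at top-level non-paren characters and filter each segment by one unified rule keeping exactly the characters whose balance is positive on both sides.
import Mathlib
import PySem

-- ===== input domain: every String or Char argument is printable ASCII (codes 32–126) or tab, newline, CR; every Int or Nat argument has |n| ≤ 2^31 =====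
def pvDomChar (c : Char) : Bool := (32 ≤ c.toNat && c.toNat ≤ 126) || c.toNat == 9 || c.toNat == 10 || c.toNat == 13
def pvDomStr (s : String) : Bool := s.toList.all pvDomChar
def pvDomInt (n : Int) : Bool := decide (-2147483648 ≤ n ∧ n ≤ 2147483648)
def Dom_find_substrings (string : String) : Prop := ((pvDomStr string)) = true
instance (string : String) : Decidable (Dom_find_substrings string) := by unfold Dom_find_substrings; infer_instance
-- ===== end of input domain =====

-- B replaces A's single stateful pass (mutable depth interleaved with per-branch emission rules)
-- by staged passes: annotate each char with the balance on both of its sides, cut the string at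
-- top-level non-paren chars, and filter each segment by one unified rule (objective: alternative).

-- ===== PORT A =====
-- A's loop over `string + " "`: state (depth, temp_substring as chars, substrings)
def findA_loop : List Char → Int → List Char → List String → List String
  | [], _, _, subs => subs
  | c :: cs, depth, temp, subs =>
    if c = '(' then
      findA_loop cs (depth + 1) (if depth + 1 > 1 then temp ++ [c] else temp) subs
    else if c = ')' then
      findA_loop cs (depth - 1) (if depth - 1 > 0 then temp ++ [c] else temp) subs
    else
      let temp1 := if depth > 0 then temp ++ [c] else temp
      let subs1 := if depth = 0 ∧ temp1.length > 0 then subs ++ [String.ofList temp1] else subs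
      let temp2 := if depth = 0 ∧ temp1.length > 0 then ([] : List Char) else temp1
      let subs2 := if depth = 0 ∧ c ≠ ' ' then subs1 ++ [String.ofList [c]] else subs1
      findA_loop cs depth temp2 subs2

def find_substrings (string : String) : List String :=
  if PySem.Str.count string " " = 0 then [string]
  else findA_loop (string.toList ++ [' ']) 0 [] []   -- for char in string + " "

-- ===== PORT B =====
-- pass 1: annotate each char of s with the parenthesis balance before and after it
def findB_triples : List Char → Int → List (Char × Int × Int)
  | [], _ => []
  | c :: cs, b =>
    let b' := b + (if c = '(' then 1 else 0) - (if c = ')' then 1 else 0)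
    (c, b, b') :: findB_triples cs b'

-- pass 2: cut at top-level non-paren chars; a char is a token-interior char
-- exactly when the balance on both of its sides is positive
def findB_loop : List (Char × Int × Int) → List (Char × Int × Int) → List String → List String
  | [], _, out => out
  | (c, pre, post) :: rest, seg, out =>
    if pre = 0 ∧ c ≠ '(' ∧ c ≠ ')' then
      let inner := (seg.filter fun t => min t.2.1 t.2.2 > 0).map (fun t => t.1)
      let out1 := if inner.length > 0 then out ++ [String.ofList inner] else out
      findB_loop rest [] (if c ≠ ' ' then out1 ++ [String.ofList [c]] else out1)
    else
      findB_loop rest (seg ++ [(c, pre, post)]) out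

def find_substrings_alt (string : String) : List String :=
  if PySem.Str.count string " " = 0 then [string]
  else findB_loop (findB_triples (string.toList ++ [' ']) 0) [] []

-- ===== PRECONDITION & SPEC =====
def Spec_find_substrings (string : String) (out : List String) : Prop := out = find_substrings_alt string
instance (string : String) (out : List String) : Decidable (Spec_find_substrings string out) := by unfold Spec_find_substrings; infer_instance

-- ===== CLAIM (what is proved, stated in full; the proofs are below) =====
def Claim_equal_find_substrings : Prop := ∀ (string : String), Dom_find_substrings string → Spec_find_substrings string (find_substrings string)

-- ===== LEMMAS AND PROOFS =====
-- the filtered projection of a segment extended by one annotated char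
theorem filtmap_snoc (seg : List (Char × Int × Int)) (c : Char) (p q : Int) :
    (((seg ++ [(c, p, q)]).filter fun t => min t.2.1 t.2.2 > 0).map (fun t => t.1))
      = ((seg.filter fun t => min t.2.1 t.2.2 > 0).map (fun t => t.1))
        ++ (if min p q > 0 then [c] else []) := by
  rw [List.filter_append, List.map_append, List.filter_singleton]
  by_cases h : min p q > 0 <;> simp [h]

-- Invariant: A's temp_substring is exactly the filtered segment B has accumulated.
theorem findAB_loop_eq (cs : List Char) : ∀ (depth : Int) (seg : List (Char × Int × Int)) (subs : List String),
    findA_loop cs depth ((seg.filter fun t => min t.2.1 t.2.2 > 0).map (fun t => t.1)) subs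
      = findB_loop (findB_triples cs depth) seg subs := by
  induction cs with
  | nil => intro depth seg subs; simp [findA_loop, findB_triples, findB_loop]
  | cons c cs ih =>
    intro depth seg subs
    by_cases h1 : c = '('
    · subst h1
      rw [show findB_triples ('(' :: cs) depth
            = ('(', depth, depth + 1) :: findB_triples cs (depth + 1) from by
          simp [findB_triples]]
      rw [findB_loop, if_neg (by simp), ← ih, filtmap_snoc,
          show min depth (depth + 1) = depth from by omega]
      by_cases h : (0 : Int) < depth
      · simp [findA_loop, h, show depth + 1 > 1 from by omega]
      · simp [findA_loop, h, show ¬ depth + 1 > 1 from by omega]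
    · by_cases h2 : c = ')'
      · subst h2
        rw [show findB_triples (')' :: cs) depth
              = (')', depth, depth - 1) :: findB_triples cs (depth - 1) from by
            simp [findB_triples]]
        rw [findB_loop, if_neg (by simp), ← ih, filtmap_snoc,
            show min depth (depth - 1) = depth - 1 from by omega]
        by_cases h : (0 : Int) < depth - 1
        · simp [findA_loop, show (1:Int) < depth from by omega]
        · simp [findA_loop, show ¬ (1:Int) < depth from by omega]
      · rw [show findB_triples (c :: cs) depth = (c, depth, depth) :: findB_triples cs depth from by
            simp [findB_triples, h1, h2]]
        by_cases hd : depth = 0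
        · subst hd
          rw [findB_loop, if_pos ⟨rfl, h1, h2⟩]
          by_cases hE : ((seg.filter fun t => min t.2.1 t.2.2 > 0).map (fun t => t.1)) = []
          · rw [← ih 0 [], hE]
            by_cases hsp : c = ' ' <;>
              simp [findA_loop, h1, h2, hsp]
          · rw [← ih 0 []]
            have hL : 0 < ((seg.filter fun t => min t.2.1 t.2.2 > 0).map (fun t => t.1)).length :=
              List.length_pos_iff.mpr hE
            simp only [findA_loop, if_neg h1, if_neg h2]
            split_ifs <;> first | rfl | omega | tauto
        · rw [findB_loop, if_neg (by intro hh; exact hd hh.1), ← ih, filtmap_snoc,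
              show min depth depth = depth from by omega]
          by_cases h : (0 : Int) < depth
          · simp [findA_loop, h1, h2, hd, h]
          · simp [findA_loop, h1, h2, hd, h]
-- ===== VERDICT (by name: the statement is the Claim_ definition above) =====
theorem find_substrings_spec : Claim_equal_find_substrings := by
  intro string _
  unfold Spec_find_substrings find_substrings find_substrings_alt
  split
  · rfl
  · simpa using findAB_loop_eq (string.toList ++ [' ']) 0 [] []
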